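-- pv_equiv track=rewrite | github.com/Simplus-AI/simplus-ai-auto-eda-framework | simplus_eda/core/report.py | _html_insights_section
-- ===== SOURCE A (Python) =====
-- from typing import Dict, Any, Optional, List, Union
--
-- def _html_insights_section(insights: Dict[str, Any]) -> str:
--     """Generate insights section."""
--     html = """
--     <h2 id="insights">Key Insights</h2>"""
--
--     # Data characteristics
--     if 'data_characteristics' in insights and insights['data_characteristics']:
--         html += """
--     <div class="metric-card">
--         <h3>Data Characteristics</h3>
--         <ul class="insight-list">"""
--         for insight in insights['data_characteristics']:
--             html += f"""
--             <li class="insight-item">{insight}</li>"""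
--         html += """
--         </ul>
--     </div>"""
--
--     # Quality issues
--     if 'quality_issues' in insights and insights['quality_issues']:
--         html += """
--     <div class="metric-card">
--         <h3>Quality Issues</h3>
--         <ul class="insight-list">"""
--         for insight in insights['quality_issues']:
--             html += f"""
--             <li class="insight-item quality">{insight}</li>"""
--         html += """
--         </ul>
--     </div>"""
--
--     # Statistical findings
--     if 'statistical_findings' in insights and insights['statistical_findings']:
--         html += """
--     <div class="metric-card">
--         <h3>Statistical Findings</h3>
--         <ul class="insight-list">"""
--         for insight in insights['statistical_findings']:
--             html += f"""
--             <li class="insight-item statistical">{insight}</li>"""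
--         html += """
--         </ul>
--     </div>"""
--
--     # Recommendations
--     if 'recommendations' in insights and insights['recommendations']:
--         html += """
--     <div class="metric-card">
--         <h3>Recommendations</h3>
--         <ul class="insight-list">"""
--         for insight in insights['recommendations']:
--             html += f"""
--             <li class="insight-item recommendation">{insight}</li>"""
--         html += """
--         </ul>
--     </div>"""
--
--     return html
-- ===== SOURCE B (Python) =====
-- _SECTIONS = (
--     ('data_characteristics', 'Data Characteristics', 'insight-item'),
--     ('quality_issues', 'Quality Issues', 'insight-item quality'),
--     ('statistical_findings', 'Statistical Findings', 'insight-item statistical'),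
--     ('recommendations', 'Recommendations', 'insight-item recommendation'),
-- )
--
--
-- def _render(insights, specs):
--     """Recursively render the remaining sections, building the tail first."""
--     if not specs:
--         return ''
--     key, title, cls = specs[0]
--     tail = _render(insights, specs[1:])
--     items = insights.get(key)
--     if not items:
--         return tail
--     body = ''.join('\n            <li class="%s">%s</li>' % (cls, it) for it in items)
--     return ('\n    <div class="metric-card">\n        <h3>%s</h3>'
--             '\n        <ul class="insight-list">%s\n        </ul>\n    </div>' % (title, body)) + tail
--
--
-- def _html_insights_section(insights) -> str:
--     """Generate insights section."""
--     return '\n    <h2 id="insights">Key Insights</h2>' + _render(insights, _SECTIONS)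
-- ===== Notes on version B (the rewrite author's own statement) =====
-- stated objective: simpler
-- what changed: Replaces four copy-pasted accumulate-into-html blocks with a recursive renderer over a section spec list that builds the string back-to-front, each present section rendered as one formatted string whose item list is a joined map.
import Mathlib
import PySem

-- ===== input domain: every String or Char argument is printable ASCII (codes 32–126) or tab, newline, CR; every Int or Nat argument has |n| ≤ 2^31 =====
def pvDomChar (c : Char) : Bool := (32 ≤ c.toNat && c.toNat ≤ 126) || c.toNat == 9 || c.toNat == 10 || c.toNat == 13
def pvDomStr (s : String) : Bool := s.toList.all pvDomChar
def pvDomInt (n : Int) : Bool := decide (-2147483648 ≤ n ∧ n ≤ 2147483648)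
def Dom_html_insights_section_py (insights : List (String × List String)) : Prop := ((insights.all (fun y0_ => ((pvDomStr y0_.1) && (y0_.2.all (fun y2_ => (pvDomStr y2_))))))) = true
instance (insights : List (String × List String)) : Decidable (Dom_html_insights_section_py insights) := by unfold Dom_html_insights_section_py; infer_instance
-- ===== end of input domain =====

-- B is a simpler re-implementation: a recursive renderer over a (key, title,
-- class) spec list builds the result back-to-front, each present section being
-- one formatted string whose item list is a joined map; return value proved
-- byte-identical to A's four copy-pasted accumulation blocks.

-- ===== PORT A =====
-- literal transliteration: four sequential blocks, each guarded by
-- `'key' in insights and insights['key']` (= get? returns a nonempty list),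
-- appending the header, one <li> per insight, and the footer onto html.
def html_insights_section_py (insights : List (String × List String)) : String :=
  let d := PySem.Dict.mk insights
  let html := "\n    <h2 id=\"insights\">Key Insights</h2>"
  let html :=
    match d.get? "data_characteristics" with
    | none => html
    | some v =>
      if v.isEmpty then html else
        (v.foldl (fun h insight => h ++ ("\n            <li class=\"insight-item\">" ++ insight ++ "</li>"))
          (html ++ "\n    <div class=\"metric-card\">\n        <h3>Data Characteristics</h3>\n        <ul class=\"insight-list\">"))
        ++ "\n        </ul>\n    </div>"
  let html :=
    match d.get? "quality_issues" with
    | none => html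
    | some v =>
      if v.isEmpty then html else
        (v.foldl (fun h insight => h ++ ("\n            <li class=\"insight-item quality\">" ++ insight ++ "</li>"))
          (html ++ "\n    <div class=\"metric-card\">\n        <h3>Quality Issues</h3>\n        <ul class=\"insight-list\">"))
        ++ "\n        </ul>\n    </div>"
  let html :=
    match d.get? "statistical_findings" with
    | none => html
    | some v =>
      if v.isEmpty then html else
        (v.foldl (fun h insight => h ++ ("\n            <li class=\"insight-item statistical\">" ++ insight ++ "</li>"))
          (html ++ "\n    <div class=\"metric-card\">\n        <h3>Statistical Findings</h3>\n        <ul class=\"insight-list\">"))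
        ++ "\n        </ul>\n    </div>"
  let html :=
    match d.get? "recommendations" with
    | none => html
    | some v =>
      if v.isEmpty then html else
        (v.foldl (fun h insight => h ++ ("\n            <li class=\"insight-item recommendation\">" ++ insight ++ "</li>"))
          (html ++ "\n    <div class=\"metric-card\">\n        <h3>Recommendations</h3>\n        <ul class=\"insight-list\">"))
        ++ "\n        </ul>\n    </div>"
  html

-- ===== PORT B =====
-- transliteration of Source B: _SECTIONS spec list, recursive _render building the
-- tail first, body of a section = join of the mapped <li> lines.
def pvSections : List (String × String × String) :=
  [("data_characteristics", "Data Characteristics", "insight-item"),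
   ("quality_issues", "Quality Issues", "insight-item quality"),
   ("statistical_findings", "Statistical Findings", "insight-item statistical"),
   ("recommendations", "Recommendations", "insight-item recommendation")]

def pvRender (insights : List (String × List String)) : List (String × String × String) → String
  | [] => ""
  | spec :: rest =>
    let tail := pvRender insights rest
    match (PySem.Dict.mk insights).get? spec.1 with
    | none => tail
    | some items =>
      if items.isEmpty then tail else
        ("\n    <div class=\"metric-card\">\n        <h3>" ++ spec.2.1 ++ "</h3>"
          ++ "\n        <ul class=\"insight-list\">"
          ++ String.join (items.map (fun it => "\n            <li class=\"" ++ spec.2.2 ++ "\">" ++ it ++ "</li>"))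
          ++ "\n        </ul>\n    </div>") ++ tail

def html_insights_section_py_alt (insights : List (String × List String)) : String :=
  "\n    <h2 id=\"insights\">Key Insights</h2>" ++ pvRender insights pvSections

-- ===== PRECONDITION & SPEC =====
def Spec_html_insights_section_py (insights : List (String × List String)) (out : String) : Prop := out = html_insights_section_py_alt insights
instance (insights : List (String × List String)) (out : String) : Decidable (Spec_html_insights_section_py insights out) := by unfold Spec_html_insights_section_py; infer_instance

-- ===== CLAIM (what is proved, stated in full; the proofs are below) =====
def Claim_equal_html_insights_section_py : Prop := ∀ (insights : List (String × List String)), Dom_html_insights_section_py insights → Spec_html_insights_section_py insights (html_insights_section_py insights)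

-- ===== LEMMAS AND PROOFS =====

theorem pv_foldl_app (t : List String) (a b : String) :
    List.foldl (fun r s => r ++ s) (a ++ b) t = a ++ List.foldl (fun r s => r ++ s) b t := by
  induction t generalizing b with
  | nil => rfl
  | cons x xs ih => simp only [List.foldl]; rw [String.append_assoc, ih]

theorem pv_join_cons (a : String) (t : List String) :
    String.join (a :: t) = a ++ String.join t := by
  show List.foldl (fun r s => r ++ s) ("" ++ a) t = _
  rw [String.empty_append]
  calc List.foldl (fun r s => r ++ s) a t
      = List.foldl (fun r s => r ++ s) (a ++ "") t := by rw [String.append_empty]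
    _ = a ++ String.join t := pv_foldl_app t a ""

-- A's per-item foldl equals prepending the accumulator to B's joined map.
theorem pv_foldl_join (li : String → String) (items : List String) (s : String) :
    items.foldl (fun h i => h ++ li i) s = s ++ String.join (items.map li) := by
  induction items generalizing s with
  | nil => simp [String.join, String.append_empty]
  | cons a t ih =>
    simp only [List.foldl, List.map]
    rw [ih, pv_join_cons, String.append_assoc]

-- one section block of A, rewritten as "accumulator ++ B's section value"
theorem pv_sec (d : PySem.Dict String (List String)) (key title cls hdr : String)
    (li : String → String) (s : String)
    (hhdr : hdr = "\n    <div class=\"metric-card\">\n        <h3>" ++ title ++ "</h3>"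
      ++ "\n        <ul class=\"insight-list\">")
    (hli : ∀ i, li i = "\n            <li class=\"" ++ cls ++ "\">" ++ i ++ "</li>") :
    (match d.get? key with
      | none => s
      | some v =>
        if v.isEmpty then s else
          (v.foldl (fun h i => h ++ li i) (s ++ hdr)) ++ "\n        </ul>\n    </div>")
    = s ++ (match d.get? key with
      | none => ""
      | some items =>
        if items.isEmpty then "" else
          ("\n    <div class=\"metric-card\">\n        <h3>" ++ title ++ "</h3>"
            ++ "\n        <ul class=\"insight-list\">"
            ++ String.join (items.map (fun it => "\n            <li class=\"" ++ cls ++ "\">" ++ it ++ "</li>"))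
            ++ "\n        </ul>\n    </div>")) := by
  cases d.get? key with
  | none => simp [String.append_empty]
  | some v =>
    dsimp only
    by_cases h : v.isEmpty
    · simp [h, String.append_empty]
    · rw [if_neg h, if_neg h, pv_foldl_join, hhdr]
      have : v.map li = v.map (fun it => "\n            <li class=\"" ++ cls ++ "\">" ++ it ++ "</li>") :=
        List.map_congr_left (fun i _ => hli i)
      rw [this]
      simp [String.append_assoc]

-- B's recursive render, one step flattened into "section value ++ tail"
theorem pv_render_cons (insights : List (String × List String))
    (spec : String × String × String) (rest : List (String × String × String)) :
    pvRender insights (spec :: rest) =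
      (match (PySem.Dict.mk insights).get? spec.1 with
       | none => ""
       | some items =>
         if items.isEmpty then "" else
           ("\n    <div class=\"metric-card\">\n        <h3>" ++ spec.2.1 ++ "</h3>"
             ++ "\n        <ul class=\"insight-list\">"
             ++ String.join (items.map (fun it => "\n            <li class=\"" ++ spec.2.2 ++ "\">" ++ it ++ "</li>"))
             ++ "\n        </ul>\n    </div>"))
      ++ pvRender insights rest := by
  simp only [pvRender]
  cases (PySem.Dict.mk insights).get? spec.1 with
  | none => simp [String.empty_append]
  | some items =>
    dsimp only
    by_cases h : items.isEmpty
    · simp [h, String.empty_append]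
    · simp [h, String.append_assoc]

theorem pv_render_nil (insights : List (String × List String)) : pvRender insights [] = "" := rfl

-- ===== VERDICT (by name: the statement is the Claim_ definition above) =====
theorem html_insights_section_py_spec : Claim_equal_html_insights_section_py := by
  intro insights _
  unfold Spec_html_insights_section_py html_insights_section_py html_insights_section_py_alt
  simp only [pvSections, pv_render_cons, pv_render_nil]
  rw [pv_sec _ "data_characteristics" "Data Characteristics" "insight-item"
        "\n    <div class=\"metric-card\">\n        <h3>Data Characteristics</h3>\n        <ul class=\"insight-list\">"
        (fun insight => "\n            <li class=\"insight-item\">" ++ insight ++ "</li>") _ rfl (fun i => rfl),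
      pv_sec _ "quality_issues" "Quality Issues" "insight-item quality"
        "\n    <div class=\"metric-card\">\n        <h3>Quality Issues</h3>\n        <ul class=\"insight-list\">"
        (fun insight => "\n            <li class=\"insight-item quality\">" ++ insight ++ "</li>") _ rfl (fun i => rfl),
      pv_sec _ "statistical_findings" "Statistical Findings" "insight-item statistical"
        "\n    <div class=\"metric-card\">\n        <h3>Statistical Findings</h3>\n        <ul class=\"insight-list\">"
        (fun insight => "\n            <li class=\"insight-item statistical\">" ++ insight ++ "</li>") _ rfl (fun i => rfl),
      pv_sec _ "recommendations" "Recommendations" "insight-item recommendation"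
        "\n    <div class=\"metric-card\">\n        <h3>Recommendations</h3>\n        <ul class=\"insight-list\">"
        (fun insight => "\n            <li class=\"insight-item recommendation\">" ++ insight ++ "</li>") _ rfl (fun i => rfl)]
  simp only [String.append_assoc, String.append_empty]
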